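-- pv_equiv track=rewrite | github.com/yallerocha/University-Projects | src/Algorithms I/Ofuscador.py | ofuscador
-- ===== SOURCE A (Python) =====
-- def ofuscador(linha):
--
--     linha2 = ''
--     linha3 = ''
--     linhafinal = ''
--
--     for caractere in linha:
--         if 65 <= ord(caractere) <= 90:
--             linha2 = linha2 + chr(ord(caractere) + 32)
--         elif 97 <= ord(caractere) <= 122:
--             linha2 = linha2 + chr(ord(caractere) - 32)
--         else:
--             linha2 = linha2 + caractere
--
--     for caractere in linha2:
--         if caractere == 'A' or caractere == 'a':
--             linha3 = linha3 + '4'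
--         elif caractere == 'B' or caractere == 'b':
--             linha3 = linha3 + '8'
--         elif caractere == 'E' or caractere == 'e':
--             linha3 = linha3 + '3'
--         elif caractere == 'G' or caractere == 'g':
--             linha3 = linha3 + '6'
--         elif caractere == 'I' or caractere == 'i':
--             linha3 = linha3 + '1'
--         elif caractere == 'L' or caractere == 'l':
--             linha3 = linha3 + '7'
--         elif caractere == 'S' or caractere == 's':
--             linha3 = linha3 + '5'
--         elif caractere == 'O' or caractere == 'o':
--             linha3 = linha3 + '0'
--         else:
--             linha3 = linha3 + caractere
--
--     for caractere in linha3: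
--         if ord(caractere) == 32:
--             linhafinal = linhafinal + "*"
--         # PARTE NÃO FINALIZADA
--
--         else:
--             linhafinal = linhafinal + caractere
--
--     return linhafinal
-- ===== SOURCE B (Python) =====
-- _TABLE = {' ': '*'}
-- for _lo, _d in zip('abegilso', '48361750'):
--     _TABLE[_lo] = _d
--     _TABLE[_lo.upper()] = _d
-- for _i in range(26):
--     _l, _u = chr(97 + _i), chr(65 + _i)
--     if _l not in _TABLE:
--         _TABLE[_l] = _u
--         _TABLE[_u] = _l
--
-- def ofuscador(linha):
--     return ''.join(_TABLE.get(c, c) for c in linha)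
-- ===== Notes on version B (the rewrite author's own statement) =====
-- stated objective: simpler
-- what changed: Replaces A's three sequential rewrite passes (case-swap string, then leet string, then space-to-asterisk string, each built by repeated string concatenation) by one translation table built once and a single table-lookup join pass over the input.
import Mathlib
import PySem

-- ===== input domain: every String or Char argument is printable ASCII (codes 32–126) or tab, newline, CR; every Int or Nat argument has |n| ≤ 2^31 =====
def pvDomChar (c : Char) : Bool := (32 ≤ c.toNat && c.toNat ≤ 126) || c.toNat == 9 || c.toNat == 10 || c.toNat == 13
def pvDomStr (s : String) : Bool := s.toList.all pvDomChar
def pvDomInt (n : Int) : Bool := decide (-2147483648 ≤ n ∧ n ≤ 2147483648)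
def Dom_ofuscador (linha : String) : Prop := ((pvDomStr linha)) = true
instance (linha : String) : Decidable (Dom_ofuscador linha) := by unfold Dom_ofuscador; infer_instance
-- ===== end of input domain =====

-- B replaces A's three sequential rewrite passes by one table built once and a single lookup pass (objective: simpler).

-- ===== PORT A =====
-- pass 1 step: swap ASCII letter case
def aSwap (c : Char) : Char :=
  if 65 ≤ c.toNat ∧ c.toNat ≤ 90 then Char.ofNat (c.toNat + 32)
  else if 97 ≤ c.toNat ∧ c.toNat ≤ 122 then Char.ofNat (c.toNat - 32)
  else c

-- pass 2 step: leetspeak substitution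
def aLeet (c : Char) : Char :=
  if c = 'A' ∨ c = 'a' then '4'
  else if c = 'B' ∨ c = 'b' then '8'
  else if c = 'E' ∨ c = 'e' then '3'
  else if c = 'G' ∨ c = 'g' then '6'
  else if c = 'I' ∨ c = 'i' then '1'
  else if c = 'L' ∨ c = 'l' then '7'
  else if c = 'S' ∨ c = 's' then '5'
  else if c = 'O' ∨ c = 'o' then '0'
  else c

-- pass 3 step: space to asterisk
def aStar (c : Char) : Char :=
  if c.toNat = 32 then '*' else c

def ofuscador (linha : String) : String :=
  let linha2 := linha.toList.foldl (fun acc c => acc ++ [aSwap c]) []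
  let linha3 := linha2.foldl (fun acc c => acc ++ [aLeet c]) []
  let linhafinal := linha3.foldl (fun acc c => acc ++ [aStar c]) []
  String.ofList linhafinal

-- ===== PORT B =====
-- the composed table, built once like Source B's module-level _TABLE
def bTable : PySem.Dict Char Char :=
  let t : PySem.Dict Char Char := PySem.Dict.empty.insert ' ' '*'
  let t := (List.zip "abegilso".toList "48361750".toList).foldl
    (fun t p => (t.insert p.1 p.2).insert (Char.ofNat (p.1.toNat - 32)) p.2) t
  (List.range 26).foldl
    (fun t i =>
      let lo := Char.ofNat (97 + i)
      let up := Char.ofNat (65 + i)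
      if (PySem.Dict.get? t lo).isSome then t else (t.insert lo up).insert up lo) t

def ofuscador_alt (linha : String) : String :=
  String.ofList (linha.toList.map (fun c => PySem.Dict.getD bTable c c))

-- ===== PRECONDITION & SPEC =====
def Spec_ofuscador (linha : String) (out : String) : Prop := out = ofuscador_alt linha
instance (linha : String) (out : String) : Decidable (Spec_ofuscador linha out) := by unfold Spec_ofuscador; infer_instance

-- ===== CLAIM (what is proved, stated in full; the proofs are below) =====
def Claim_equal_ofuscador : Prop := ∀ (linha : String), Dom_ofuscador linha → Spec_ofuscador linha (ofuscador linha)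

-- ===== LEMMAS AND PROOFS =====
theorem pv_foldl_append_map {α β : Type} (f : α → β) (xs : List α) (acc : List β) :
    List.foldl (fun a c => a ++ [f c]) acc xs = acc ++ xs.map f := by
  induction xs generalizing acc with
  | nil => simp
  | cons x xs ih => simp [List.foldl, ih]

set_option maxRecDepth 10000 in
theorem pv_char_key_bool :
    ((List.range 128).all (fun n =>
      aStar (aLeet (aSwap (Char.ofNat n))) == PySem.Dict.getD bTable (Char.ofNat n) (Char.ofNat n))) = true := by
  decide

theorem pv_char_key (n : Nat) (h : n < 128) :
    aStar (aLeet (aSwap (Char.ofNat n))) = PySem.Dict.getD bTable (Char.ofNat n) (Char.ofNat n) := by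
  have := List.all_eq_true.mp pv_char_key_bool n (List.mem_range.mpr h)
  exact eq_of_beq this

-- ===== VERDICT (by name: the statement is the Claim_ definition above) =====
theorem ofuscador_spec : Claim_equal_ofuscador := by
  intro linha hdom
  unfold Spec_ofuscador ofuscador ofuscador_alt
  simp only [pv_foldl_append_map, List.nil_append, List.map_map]
  refine congrArg String.ofList ?_
  apply List.map_congr_left
  intro c hc
  have hDc : pvDomChar c = true := by
    have := (List.all_eq_true.mp hdom) c hc
    simpa using this
  have hlt : c.toNat < 128 := by
    simp only [pvDomChar, Bool.or_eq_true, Bool.and_eq_true, decide_eq_true_eq, beq_iff_eq] at hDc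
    omega
  have := pv_char_key c.toNat hlt
  simpa using this
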